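-- pv_equiv track=rewrite | github.com/Hayan47/Information-Retrieval-System | preprocessing/text_processing.py | remove_triple_letters
-- ===== SOURCE A (Python) =====
-- def remove_triple_letters(tokens):
--     filtered_tokens = []
--     for token in tokens:
--         has_triple = False
--         for i in range(2, len(token)):
--             if token[i] == token[i-1] == token[i-2]:
--                 has_triple = True
--                 break
--         if not has_triple:
--             filtered_tokens.append(token)
--     return filtered_tokens
-- ===== SOURCE B (Python) =====
-- def remove_triple_letters(tokens):
--     # keep a token unless, for some distinct character c of it, the
--     # substring c*3 occurs in the token
--     return [t for t in tokens if not any(c * 3 in t for c in set(t))]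
-- ===== Notes on version B (the rewrite author's own statement) =====
-- stated objective: alternative
-- what changed: Instead of scanning each token position-by-position for a triple, B builds the set of distinct characters of the token and keeps it iff no substring c*3 (for c in that set) occurs in the token.
import Mathlib
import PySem

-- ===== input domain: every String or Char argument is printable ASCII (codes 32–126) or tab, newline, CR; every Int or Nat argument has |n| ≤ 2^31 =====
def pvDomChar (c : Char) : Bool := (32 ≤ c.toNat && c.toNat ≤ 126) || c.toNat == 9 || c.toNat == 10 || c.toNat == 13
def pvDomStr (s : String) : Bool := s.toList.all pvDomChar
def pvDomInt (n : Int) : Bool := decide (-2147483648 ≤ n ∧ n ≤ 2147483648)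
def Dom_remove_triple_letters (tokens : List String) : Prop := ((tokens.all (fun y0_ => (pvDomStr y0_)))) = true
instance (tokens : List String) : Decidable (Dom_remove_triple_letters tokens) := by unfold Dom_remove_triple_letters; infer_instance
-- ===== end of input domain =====

-- B tests each token by substring search: build the set of distinct characters
-- and drop the token iff c*3 occurs in it for some such c (alternative algorithm).


-- ===== PORT A =====
-- inner 'for i in range(2, len(token))' with break: recursion on the index i;
-- token[i] with i always in range, ported as List.getD
def loopA (cs : List Char) (i : Nat) : Bool :=
  if i < cs.length then
    if cs.getD i ' ' == cs.getD (i-1) ' ' && cs.getD (i-1) ' ' == cs.getD (i-2) ' ' then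
      true
    else
      loopA cs (i+1)
  else
    false
termination_by cs.length - i

def remove_triple_letters (tokens : List String) : List String :=
  tokens.foldl (fun acc token =>
    let has_triple := loopA token.toList 2
    if !has_triple then acc ++ [token] else acc) []

-- ===== PORT B =====
-- any(c * 3 in t for c in set(t)): distinct characters via PySem.Set.ofList,
-- substring test via PySem.Chars.isIn (the result is order-independent, so
-- iterating the Set's element list is exact)
def hasTripleB (cs : List Char) : Bool :=
  (PySem.Set.ofList cs).any (fun c => PySem.Chars.isIn [c, c, c] cs)

def remove_triple_letters_alt (tokens : List String) : List String :=
  tokens.filter (fun t => !hasTripleB t.toList)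

-- ===== PRECONDITION & SPEC =====
def Spec_remove_triple_letters (tokens : List String) (out : List String) : Prop := out = remove_triple_letters_alt tokens
instance (tokens : List String) (out : List String) : Decidable (Spec_remove_triple_letters tokens out) := by unfold Spec_remove_triple_letters; infer_instance

-- ===== CLAIM (what is proved, stated in full; the proofs are below) =====
def Claim_equal_remove_triple_letters : Prop := ∀ (tokens : List String), Dom_remove_triple_letters tokens → Spec_remove_triple_letters tokens (remove_triple_letters tokens)

-- ===== LEMMAS AND PROOFS =====

-- reference predicate: a window of three equal consecutive chars exists
def tri : List Char → Bool
  | a :: b :: c :: rest => (a == b && b == c) || tri (b :: c :: rest)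
  | _ => false

theorem tri_short (cs : List Char) (h : cs.length ≤ 2) : tri cs = false := by
  match cs with
  | [] => rfl
  | [_] => rfl
  | [_, _] => rfl
  | _ :: _ :: _ :: _ => simp at h

theorem loopA_eq (cs : List Char) : ∀ (m k : Nat), cs.length - k ≤ m →
    loopA cs (k+2) = tri (cs.drop k) := by
  intro m
  induction m with
  | zero =>
    intro k hk
    have hlen : cs.length ≤ k := by omega
    rw [loopA]
    rw [if_neg (by omega)]
    rw [tri_short _ (by simp; omega)]
  | succ m ih =>
    intro k hk
    rw [loopA]
    by_cases h : k + 2 < cs.length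
    · have h0 : k < cs.length := by omega
      have h1 : k + 1 < cs.length := by omega
      have hd0 : cs.drop k = cs[k] :: cs.drop (k+1) := List.drop_eq_getElem_cons h0
      have hd1 : cs.drop (k+1) = cs[k+1] :: cs.drop (k+2) := List.drop_eq_getElem_cons h1
      have hd2 : cs.drop (k+2) = cs[k+2] :: cs.drop (k+3) := List.drop_eq_getElem_cons h
      rw [if_pos h]
      have e0 : cs.getD (k+2-1) ' ' = cs[k+1] := by
        simp [List.getD_eq_getElem?_getD, List.getElem?_eq_getElem h1]
      have e1 : cs.getD (k+2) ' ' = cs[k+2] := by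
        simp [List.getD_eq_getElem?_getD, List.getElem?_eq_getElem h]
      have e2 : cs.getD (k+2-2) ' ' = cs[k] := by
        simp [List.getD_eq_getElem?_getD, List.getElem?_eq_getElem h0]
      have sym : ∀ a b : Char, (a == b) = (b == a) := by
        intro a b
        by_cases hab : a = b
        · subst hab; rfl
        · have hba : ¬ b = a := fun e => hab e.symm
          simp [hab, hba]
      have hcond : (cs[k+2] == cs[k+1] && cs[k+1] == cs[k])
          = (cs[k] == cs[k+1] && cs[k+1] == cs[k+2]) := by
        rw [sym (cs[k+2]) (cs[k+1]), sym (cs[k+1]) (cs[k]), Bool.and_comm]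
      rw [e0, e1, e2, hd0, hd1, hd2, tri, hcond]
      cases hC : (cs[k] == cs[k+1] && cs[k+1] == cs[k+2])
      · rw [show k + 2 + 1 = (k+1) + 2 by ring, ih (k+1) (by omega), hd1, hd2]
        simp
      · simp
    · rw [if_neg h]
      rw [tri_short _ (by simp; omega)]

-- tri holds exactly when some [c,c,c] is an infix
theorem tri_iff : ∀ (cs : List Char), tri cs = true ↔ ∃ c, [c, c, c] <:+: cs := by
  intro cs
  induction cs with
  | nil =>
    simp [tri]
  | cons a l ih =>
    match l, ih with
    | [], _ =>
      simp [tri]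
      intro c h
      have := h.length_le
      simp at this
    | [b], _ =>
      simp [tri]
      intro c h
      have := h.length_le
      simp at this
    | b :: c :: rest, ih =>
      rw [tri]
      constructor
      · intro h
        rcases Bool.or_eq_true_iff.mp h with h | h
        · refine ⟨a, [], rest, ?_⟩
          have h1 : a = b := by simpa using (Bool.and_eq_true_iff.mp h).1
          have h2 : b = c := by simpa using (Bool.and_eq_true_iff.mp h).2
          simp [h1, h2]
        · obtain ⟨d, hd⟩ := ih.mp h
          exact ⟨d, List.infix_cons hd⟩
      · rintro ⟨d, hd⟩
        rcases (List.infix_cons_iff).mp hd with hp | hi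
        · obtain ⟨t, ht⟩ := hp
          injection ht with h1 ht; injection ht with h2 ht; injection ht with h3 _
          subst h1; subst h2; subst h3
          simp
        · rw [ih.mpr ⟨d, hi⟩]
          simp

theorem hasTripleB_eq_tri (cs : List Char) : hasTripleB cs = tri cs := by
  by_cases h : tri cs = true
  · rw [h]
    obtain ⟨c, hc⟩ := (tri_iff cs).mp h
    have hmem : c ∈ cs := hc.sublist.mem (by simp)
    unfold hasTripleB
    rw [List.any_eq_true]
    exact ⟨c, (PySem.Set.mem_ofList _ _).mpr hmem, (PySem.Chars.isIn_iff_infix _ _).mpr hc⟩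
  · have h' : tri cs = false := by simpa using h
    rw [h']
    unfold hasTripleB
    rw [List.any_eq_false]
    intro c _ habs
    exact h ((tri_iff cs).mpr ⟨c, (PySem.Chars.isIn_iff_infix _ _).mp habs⟩)

theorem keep_eq (cs : List Char) : (!loopA cs 2) = !hasTripleB cs := by
  have := loopA_eq cs cs.length 0 (by omega)
  simp at this
  rw [this, hasTripleB_eq_tri]

theorem foldl_filter (p : String → Bool) :
    ∀ (l acc : List String),
    l.foldl (fun acc t => if p t then acc ++ [t] else acc) acc = acc ++ l.filter p := by
  intro l
  induction l with
  | nil => simp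
  | cons a l ih =>
    intro acc
    by_cases h : p a <;> simp [List.foldl, h, ih]

-- ===== VERDICT (by name: the statement is the Claim_ definition above) =====
theorem remove_triple_letters_spec : Claim_equal_remove_triple_letters := by
  intro tokens _
  show remove_triple_letters tokens = remove_triple_letters_alt tokens
  unfold remove_triple_letters remove_triple_letters_alt
  have : (fun (acc : List String) (token : String) =>
      let has_triple := loopA token.toList 2
      if !has_triple then acc ++ [token] else acc)
      = (fun acc token => if !hasTripleB token.toList then acc ++ [token] else acc) := by
    funext acc token
    simp only [keep_eq]
  rw [this, foldl_filter (fun t => !hasTripleB t.toList) tokens []]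
  simp
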